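-- pv_equiv track=rewrite | github.com/antonioromeu/IA_2021 | proj2/solutions/al059.py | getPN
-- ===== SOURCE A (Python) =====
-- def getPN(Y):
--     p = n = 0
--     for value in Y:
--         if (value == 0):
--             p += 1
--         else:
--             n += 1
--     return (p, n)
-- ===== SOURCE B (Python) =====
-- def getPN(Y):
--     # Divide and conquer: count (zeros, non-zeros) on halves of the index
--     # range [lo, hi) and combine the pair results by addition.
--     def go(lo, hi):
--         if hi <= lo:
--             return (0, 0)
--         if hi == lo + 1:
--             return (1, 0) if Y[lo] == 0 else (0, 1)
--         mid = (lo + hi) // 2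
--         p1, n1 = go(lo, mid)
--         p2, n2 = go(mid, hi)
--         return (p1 + p2, n1 + n2)
--     return go(0, len(Y))
-- ===== Notes on version B (the rewrite author's own statement) =====
-- stated objective: alternative
-- what changed: Replaces the single accumulator loop with two branch-updated counters by a divide-and-conquer recursion that splits the index range in half, counts each half recursively, and combines the pairs by addition.
import Mathlib
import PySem

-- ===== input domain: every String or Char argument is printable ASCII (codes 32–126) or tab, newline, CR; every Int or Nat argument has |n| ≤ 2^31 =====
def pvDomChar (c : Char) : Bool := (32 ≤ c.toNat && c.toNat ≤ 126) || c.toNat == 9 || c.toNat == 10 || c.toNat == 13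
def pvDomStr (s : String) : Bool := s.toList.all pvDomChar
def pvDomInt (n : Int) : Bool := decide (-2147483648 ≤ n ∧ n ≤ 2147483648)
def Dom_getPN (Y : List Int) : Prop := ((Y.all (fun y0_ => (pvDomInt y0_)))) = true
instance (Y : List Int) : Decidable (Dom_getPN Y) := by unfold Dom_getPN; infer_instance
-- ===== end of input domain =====

-- B replaces A's two-counter accumulator loop by a divide-and-conquer recursion on index
-- ranges that combines half-results by pair addition; alternative decomposition, same cost.

-- ===== PORT A =====
def getPN (Y : List Int) : Int × Int :=
  Y.foldl (fun (pn : Int × Int) value =>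
    if value == 0 then (pn.1 + 1, pn.2) else (pn.1, pn.2 + 1)) (0, 0)

-- ===== PORT B =====
-- go(lo, hi) of Source B; Y[lo] is ported with getD (Source B only indexes with 0 ≤ lo < len Y,
-- where Python indexing and getD agree).
def getPN_go (Y : List Int) (lo hi : Nat) : Int × Int :=
  if hi ≤ lo then (0, 0)
  else if hi = lo + 1 then (if Y.getD lo 0 == 0 then (1, 0) else (0, 1))
  else
    let mid := (lo + hi) / 2
    let a := getPN_go Y lo mid
    let b := getPN_go Y mid hi
    (a.1 + b.1, a.2 + b.2)
termination_by hi - lo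
decreasing_by all_goals omega

def getPN_alt (Y : List Int) : Int × Int :=
  getPN_go Y 0 Y.length

-- ===== PRECONDITION & SPEC =====
def Spec_getPN (Y : List Int) (out : Int × Int) : Prop := out = getPN_alt Y
instance (Y : List Int) (out : Int × Int) : Decidable (Spec_getPN Y out) := by unfold Spec_getPN; infer_instance

-- ===== CLAIM (what is proved, stated in full; the proofs are below) =====
def Claim_equal_getPN : Prop := ∀ (Y : List Int), Dom_getPN Y → Spec_getPN Y (getPN Y)

-- ===== LEMMAS AND PROOFS =====
theorem getPN_foldl_shift (Y : List Int) (p n : Int) :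
    Y.foldl (fun (pn : Int × Int) value =>
      if value == 0 then (pn.1 + 1, pn.2) else (pn.1, pn.2 + 1)) (p, n)
    = (p + (List.count 0 Y : Int), n + (Y.length : Int) - (List.count 0 Y : Int)) := by
  induction Y generalizing p n with
  | nil => simp
  | cons x xs ih =>
    rw [List.foldl_cons]
    by_cases h : x = 0
    · rw [if_pos (by simpa using h), ih, h, List.count_cons_self]
      simp only [List.length_cons, Prod.mk.injEq]
      constructor <;> (push_cast; ring)
    · rw [if_neg (by simpa using h), ih,
        List.count_cons, if_neg (by simpa using h), Nat.add_zero]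
      simp only [List.length_cons, Prod.mk.injEq, true_and]
      push_cast; ring

-- getPN_go counts zeros / non-zeros of the slice Y[lo:hi]
theorem getPN_go_eq (Y : List Int) (lo hi : Nat) (hlo : lo ≤ hi) (hhi : hi ≤ Y.length) :
    getPN_go Y lo hi
      = ((List.count 0 ((Y.drop lo).take (hi - lo)) : Int),
         ((hi - lo : Nat) : Int) - (List.count 0 ((Y.drop lo).take (hi - lo)) : Int)) := by
  induction hfuel : hi - lo using Nat.strong_induction_on generalizing lo hi with
  | _ fuel ih =>
  subst hfuel
  rw [getPN_go]
  by_cases h0 : hi ≤ lo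
  · rw [if_pos h0]
    have hz : hi - lo = 0 := by omega
    simp [hz]
  · rw [if_neg h0]
    by_cases h1 : hi = lo + 1
    · subst h1
      rw [if_pos rfl]
      have hlt : lo < Y.length := by omega
      have hslice : (Y.drop lo).take (lo + 1 - lo) = [Y[lo]] := by
        have : lo + 1 - lo = 1 := by omega
        rw [this, List.take_one, List.head?_drop]
        simp [List.getElem?_eq_getElem hlt]
      rw [hslice]
      have hget : Y.getD lo 0 = Y[lo] := by
        simp [List.getD, List.getElem?_eq_getElem hlt]
      by_cases hz : Y[lo] = 0
      · rw [if_pos (by rw [hget]; simpa using hz)]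
        simp [hz]
      · rw [if_neg (by rw [hget]; simpa using hz)]
        simp [hz]
    · rw [if_neg h1]
      have hlo2 : lo + 2 ≤ hi := by omega
      have hm1 : lo < (lo + hi) / 2 := by omega
      have hm2 : (lo + hi) / 2 < hi := by omega
      show ((getPN_go Y lo ((lo + hi) / 2)).1 + (getPN_go Y ((lo + hi) / 2) hi).1,
            (getPN_go Y lo ((lo + hi) / 2)).2 + (getPN_go Y ((lo + hi) / 2) hi).2) = _
      set mid := (lo + hi) / 2 with hmid
      clear_value mid
      rw [ih (mid - lo) (by omega) lo mid (by omega) (by omega) rfl,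
          ih (hi - mid) (by omega) mid hi (by omega) hhi rfl]
      have hsplit : (Y.drop lo).take (hi - lo)
          = (Y.drop lo).take (mid - lo) ++ (Y.drop mid).take (hi - mid) := by
        have h' : hi - lo = (mid - lo) + (hi - mid) := by omega
        rw [h', List.take_add, List.drop_drop, Nat.add_sub_cancel' hm1.le]
      rw [hsplit, List.count_append]
      simp only [Prod.mk.injEq]
      have h'' : (hi - lo : ℕ) = (mid - lo) + (hi - mid) := by omega
      rw [h'']
      constructor
      · push_cast; ring
      · push_cast; ring

-- ===== VERDICT (by name: the statement is the Claim_ definition above) =====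
theorem getPN_spec : Claim_equal_getPN := by
  intro Y _
  show getPN Y = getPN_alt Y
  unfold getPN getPN_alt
  rw [getPN_foldl_shift, getPN_go_eq Y 0 Y.length (Nat.zero_le _) le_rfl]
  simp
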